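-- pv_equiv track=rewrite | github.com/CDBiddulph/scaffold-learning | experiments/keep_crosswords_20250711_195402/scaffolds/8-2-0-2/scaffold.py | get_answer_length
-- ===== SOURCE A (Python) =====
-- def get_answer_length(clue_num, direction, grid, clue_positions):
--     """Determine the expected length of an answer based on grid structure"""
--     if not grid or clue_num not in clue_positions:
--         return None
--
--     start_row, start_col = clue_positions[clue_num]
--     length = 0
--
--     if direction == "across":
--         col = start_col
--         while col < len(grid[0]) and grid[start_row][col] != ".":
--             length += 1
--             col += 1
--     else:  # down
--         row = start_row
--         while row < len(grid) and grid[row][start_col] != ".":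
--             length += 1
--             row += 1
--
--     return length if length > 1 else None
-- ===== SOURCE B (Python) =====
-- def get_answer_length(clue_num, direction, grid, clue_positions):
--     """Determine the expected length of an answer based on grid structure"""
--     if not grid or clue_num not in clue_positions:
--         return None
--     start_row, start_col = clue_positions[clue_num]
--     if direction == "across":
--         line = grid[start_row][start_col:]
--     else:  # down
--         line = [row[start_col] for row in grid][start_row:]
--     try:
--         length = line.index(".")
--     except ValueError:
--         length = len(line)
--     return length if length > 1 else None
-- ===== Notes on version B (the rewrite author's own statement) =====
-- stated objective: alternative
-- what changed: Replaces A's incremental cell-by-cell while-loop counting with slicing out the remaining row/column as a list and locating the first block with a single index search; Pre_ excludes non-rectangular grids and looked-up clue positions with negative or out-of-range coordinates, where A raises IndexError or where Python's negative-index wraparound / ragged rows make both programs' values accidental.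
-- outside the precondition, e.g. on get_answer_length(1, 'across', [['A', 'B']], {1: (0, -1)}): A returns 3, B returns None; on get_answer_length(1, 'across', [['A', 'A'], ['B', 'B', 'B']], {1: (1, 0)}): A returns 2, B returns 3; on get_answer_length(1, 'down', [['A']], {1: (5, 5)}): A returns None, B raises IndexError
import Mathlib
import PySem

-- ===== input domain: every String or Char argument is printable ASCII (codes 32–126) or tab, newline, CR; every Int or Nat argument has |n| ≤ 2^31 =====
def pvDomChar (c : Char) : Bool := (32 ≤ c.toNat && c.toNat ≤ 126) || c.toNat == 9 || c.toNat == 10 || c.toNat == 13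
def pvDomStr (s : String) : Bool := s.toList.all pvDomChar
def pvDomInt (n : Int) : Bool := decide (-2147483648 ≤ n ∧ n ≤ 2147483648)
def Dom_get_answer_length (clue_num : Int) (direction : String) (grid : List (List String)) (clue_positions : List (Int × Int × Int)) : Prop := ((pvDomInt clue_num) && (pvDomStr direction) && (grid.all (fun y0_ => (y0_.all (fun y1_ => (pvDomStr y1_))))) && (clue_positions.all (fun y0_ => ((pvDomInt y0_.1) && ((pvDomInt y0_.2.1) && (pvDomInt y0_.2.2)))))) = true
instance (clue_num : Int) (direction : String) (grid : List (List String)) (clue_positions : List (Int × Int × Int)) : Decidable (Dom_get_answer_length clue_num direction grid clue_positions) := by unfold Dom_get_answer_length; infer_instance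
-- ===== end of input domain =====

-- B replaces A's incremental while-loop cell counting by slicing out the remaining
-- row/column and locating the first block with one index search (objective: alternative).

-- ===== PORT A =====
-- A's across while-loop: 'while col < len(grid[0]) and grid[start_row][col] != "."'.
-- Cell accesses are Python indexing (pyGet?); a failed access is an IndexError in
-- Python — excluded by Pre_, so the '.getD' defaults are never reached there.
def pvAcrossLoop (grid : List (List String)) (w r : Int) (col len : Int) : Int :=
  if _h : col < w then
    if (PySem.List.pyGet? ((PySem.List.pyGet? grid r).getD []) col).getD "." ≠ "." then
      pvAcrossLoop grid w r (col + 1) (len + 1)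
    else len
  else len
termination_by (w - col).toNat
decreasing_by omega

-- A's down while-loop: 'while row < len(grid) and grid[row][start_col] != "."'.
def pvDownLoop (grid : List (List String)) (m c : Int) (row len : Int) : Int :=
  if _h : row < m then
    if (PySem.List.pyGet? ((PySem.List.pyGet? grid row).getD []) c).getD "." ≠ "." then
      pvDownLoop grid m c (row + 1) (len + 1)
    else len
  else len
termination_by (m - row).toNat
decreasing_by omega

def get_answer_length (clue_num : Int) (direction : String) (grid : List (List String)) (clue_positions : List (Int × Int × Int)) : Option Int :=
  let d := PySem.Dict.ofList (clue_positions.map (fun t => (t.1, (t.2.1, t.2.2))))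
  if grid = [] ∨ ¬ d.contains clue_num then none
  else
    match d.get? clue_num with
    | none => none
    | some (start_row, start_col) =>
      let length :=
        if direction = "across" then
          pvAcrossLoop grid ((grid.headD []).length : Int) start_row start_col 0
        else
          pvDownLoop grid (grid.length : Int) start_col start_row 0
      if length > 1 then some length else none

-- ===== PORT B =====
def get_answer_length_alt (clue_num : Int) (direction : String) (grid : List (List String)) (clue_positions : List (Int × Int × Int)) : Option Int :=
  let d := PySem.Dict.ofList (clue_positions.map (fun t => (t.1, (t.2.1, t.2.2))))
  if grid = [] ∨ ¬ d.contains clue_num then none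
  else
    match d.get? clue_num with
    | none => none
    | some (start_row, start_col) =>
      -- grid[start_row][start_col:]  resp.  [row[start_col] for row in grid][start_row:]
      -- (accesses are Python indexing; a failed one is an IndexError, excluded by Pre_)
      let line : List String :=
        if direction = "across" then
          PySem.List.slice ((PySem.List.pyGet? grid start_row).getD []) (some start_col) none
        else
          PySem.List.slice (grid.map (fun row => (PySem.List.pyGet? row start_col).getD "")) (some start_row) none
      -- try: length = line.index(".")  except ValueError: length = len(line)
      let length : Int :=
        match PySem.List.index? line "." with
        | some i => (i : Int)
        | none => (line.length : Int)
      if length > 1 then some length else none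

-- ===== PRECONDITION & SPEC =====
-- Pre_ excludes non-rectangular grids and looked-up clue positions with negative or
-- out-of-range coordinates: there A either raises IndexError or (via Python's accidental
-- negative-index wraparound, or a ragged row longer than row 0) returns a scan value that
-- is an artefact of its cell-by-cell loop, while B's slice-based value there is equally accidental.
def Pre_get_answer_length (clue_num : Int) (direction : String) (grid : List (List String)) (clue_positions : List (Int × Int × Int)) : Prop :=
  let d := PySem.Dict.ofList (clue_positions.map (fun t => (t.1, (t.2.1, t.2.2))))
  let rc := (d.get? clue_num).getD (0, 0)
  grid = [] ∨ ¬ d.contains clue_num ∨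
    ((∀ row ∈ grid, row.length = (grid.headD []).length) ∧ 0 ≤ rc.1 ∧ 0 ≤ rc.2 ∧
     (direction = "across" → rc.1 < (grid.length : Int)) ∧
     (direction ≠ "across" → rc.2 < ((grid.headD []).length : Int)))
instance (clue_num : Int) (direction : String) (grid : List (List String)) (clue_positions : List (Int × Int × Int)) : Decidable (Pre_get_answer_length clue_num direction grid clue_positions) := by unfold Pre_get_answer_length; infer_instance

def pvWitness_get_answer_length : Int × String × List (List String) × (List (Int × Int × Int)) :=
  (1, "across", [["C", "A", "T"], [".", "A", "."]], [(1, 0, 0), (2, 1, 1)])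

def Spec_get_answer_length (clue_num : Int) (direction : String) (grid : List (List String)) (clue_positions : List (Int × Int × Int)) (out : Option Int) : Prop := out = get_answer_length_alt clue_num direction grid clue_positions
instance (clue_num : Int) (direction : String) (grid : List (List String)) (clue_positions : List (Int × Int × Int)) (out : Option Int) : Decidable (Spec_get_answer_length clue_num direction grid clue_positions out) := by unfold Spec_get_answer_length; infer_instance

-- ===== CLAIM (what is proved, stated in full; the proofs are below) =====
def Claim_equal_get_answer_length : Prop := ∀ (clue_num : Int) (direction : String) (grid : List (List String)) (clue_positions : List (Int × Int × Int)), Dom_get_answer_length clue_num direction grid clue_positions → Pre_get_answer_length clue_num direction grid clue_positions → Spec_get_answer_length clue_num direction grid clue_positions (get_answer_length clue_num direction grid clue_positions)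

-- ===== LEMMAS AND PROOFS =====

-- number of leading cells before the first "." (what both scans compute)
def pvCountUntilDot : List String → Int
  | [] => 0
  | x :: xs => if x = "." then 0 else 1 + pvCountUntilDot xs

theorem pvCountUntilDot_eq_index (l : List String) :
    (match PySem.List.index? l "." with
     | some i => (i : Int)
     | none => (l.length : Int)) = pvCountUntilDot l := by
  induction l with
  | nil => simp [pvCountUntilDot, PySem.List.index?]
  | cons x xs ih =>
    by_cases hx : x = "."
    · subst hx
      rw [PySem.List.index?_cons_self "." xs]
      simp [pvCountUntilDot]
    · rw [PySem.List.index?_cons_of_ne xs hx]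
      simp only [pvCountUntilDot, if_neg hx, ← ih]
      cases PySem.List.index? xs "." with
      | none => simp; ring
      | some i => simp; ring

-- A's across loop counts up to the first "." of the sliced-off row tail
theorem pvAcrossLoop_eq (grid : List (List String)) (row : List String)
    (r : Int) (hrow : (PySem.List.pyGet? grid r).getD [] = row) :
    ∀ (n : Nat) (col len : Int), 0 ≤ col → ((row.length : Int) - col).toNat = n →
      pvAcrossLoop grid (row.length : Int) r col len
        = len + pvCountUntilDot (row.drop col.toNat) := by
  intro n
  induction n with
  | zero =>
    intro col len hc hn
    rw [pvAcrossLoop]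
    rw [dif_neg (by omega : ¬ col < (row.length : Int))]
    rw [List.drop_eq_nil_of_le (by omega)]
    simp [pvCountUntilDot]
  | succ n ih =>
    intro col len hc hn
    have hlt : col < (row.length : Int) := by omega
    have hcl : col.toNat < row.length := by omega
    rw [pvAcrossLoop, dif_pos hlt, hrow]
    have hget : PySem.List.pyGet? row col = some row[col.toNat] := by
      simp [PySem.List.pyGet?, PySem.List.pyIdx?, hc, hlt, hcl]
    have hdrop : row.drop col.toNat = row[col.toNat] :: row.drop (col.toNat + 1) :=
      List.drop_eq_getElem_cons hcl
    by_cases hdot : row[col.toNat] = "."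
    · rw [hget]
      simp only [Option.getD_some, hdot, ne_eq, not_true_eq_false, if_false]
      rw [hdrop, hdot]
      simp [pvCountUntilDot]
    · rw [hget]
      simp only [Option.getD_some, ne_eq, hdot, not_false_eq_true, if_true]
      rw [ih (col + 1) (len + 1) (by omega) (by omega)]
      rw [hdrop]
      simp only [pvCountUntilDot, if_neg hdot]
      rw [(by omega : (col + 1).toNat = col.toNat + 1)]
      ring

-- A's down loop counts up to the first "." of the sliced-off column tail
theorem pvDownLoop_eq (grid : List (List String)) (c : Int) (hc : 0 ≤ c)
    (hcw : ∀ row ∈ grid, c < (row.length : Int)) :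
    ∀ (n : Nat) (row len : Int), 0 ≤ row → ((grid.length : Int) - row).toNat = n →
      pvDownLoop grid (grid.length : Int) c row len
        = len + pvCountUntilDot ((grid.map (fun rw => (PySem.List.pyGet? rw c).getD "")).drop row.toNat) := by
  intro n
  induction n with
  | zero =>
    intro row len hr hn
    rw [pvDownLoop]
    rw [dif_neg (by omega : ¬ row < (grid.length : Int))]
    rw [List.drop_eq_nil_of_le (by simp; omega)]
    simp [pvCountUntilDot]
  | succ n ih =>
    intro row len hr hn
    have hlt : row < (grid.length : Int) := by omega
    have hrl : row.toNat < grid.length := by omega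
    rw [pvDownLoop, dif_pos hlt]
    have hgrow : PySem.List.pyGet? grid row = some grid[row.toNat] := by
      simp [PySem.List.pyGet?, PySem.List.pyIdx?, hr, hlt]
    have hcr : c.toNat < grid[row.toNat].length := by
      have := hcw grid[row.toNat] (List.getElem_mem hrl)
      omega
    have hcell : PySem.List.pyGet? grid[row.toNat] c = some grid[row.toNat][c.toNat] := by
      simp [PySem.List.pyGet?, PySem.List.pyIdx?, hc, hcr,
        show c < (grid[row.toNat].length : Int) by omega]
    have hdrop : (grid.map (fun rw => (PySem.List.pyGet? rw c).getD "")).drop row.toNat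
        = ((PySem.List.pyGet? grid[row.toNat] c).getD "")
            :: (grid.map (fun rw => (PySem.List.pyGet? rw c).getD "")).drop (row.toNat + 1) := by
      rw [List.drop_eq_getElem_cons (by simp [hrl])]
      simp
    by_cases hdot : grid[row.toNat][c.toNat] = "."
    · rw [hgrow]
      simp only [Option.getD_some, hcell, hdot, ne_eq, not_true_eq_false, if_false]
      rw [hdrop, hcell]
      simp [pvCountUntilDot, hdot]
    · rw [hgrow]
      simp only [Option.getD_some, hcell, ne_eq, hdot, not_false_eq_true, if_true]
      rw [ih (row + 1) (len + 1) (by omega) (by omega)]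
      rw [hdrop, hcell]
      simp only [Option.getD_some, pvCountUntilDot, if_neg hdot]
      rw [(by omega : (row + 1).toNat = row.toNat + 1)]
      ring

-- ===== VERDICT (by name: the statement is the Claim_ definition above) =====
theorem get_answer_length_spec : Claim_equal_get_answer_length := by
  intro clue_num direction grid clue_positions _hdom hpre
  unfold Spec_get_answer_length get_answer_length get_answer_length_alt
  unfold Pre_get_answer_length at hpre
  dsimp only at hpre ⊢
  set d := PySem.Dict.ofList (clue_positions.map (fun t => (t.1, (t.2.1, t.2.2)))) with hd
  by_cases hguard : grid = [] ∨ ¬ d.contains clue_num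
  · rw [if_pos hguard, if_pos hguard]
  · rw [if_neg hguard, if_neg hguard]
    rw [not_or, not_not] at hguard
    obtain ⟨hgrid, hcont⟩ := hguard
    have hsome : (d.get? clue_num).isSome := by
      rw [← PySem.Dict.contains_eq_isSome_get?]; exact hcont
    obtain ⟨⟨r, c⟩, hget⟩ := Option.isSome_iff_exists.mp hsome
    rcases hpre with h | h | hpre
    · exact absurd h hgrid
    · exact absurd hcont h
    rw [hget] at hpre
    obtain ⟨hrect, hr0, hc0, hacr, hdwn⟩ := hpre
    simp only [Option.getD_some] at hr0 hc0 hacr hdwn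
    rw [hget]
    dsimp only
    by_cases hdir : direction = "across"
    · -- across
      rw [if_pos hdir, if_pos hdir]
      have hrm : r < (grid.length : Int) := hacr hdir
      have hrl : r.toNat < grid.length := by omega
      have hrowget : (PySem.List.pyGet? grid r).getD [] = grid[r.toNat] := by
        simp [PySem.List.pyGet?, PySem.List.pyIdx?, hr0, hrm]
      have hw : ((grid.headD []).length : Int) = (grid[r.toNat].length : Int) := by
        rw [hrect grid[r.toNat] (List.getElem_mem hrl)]
      rw [hw, pvAcrossLoop_eq grid grid[r.toNat] r hrowget _ c 0 hc0 rfl]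
      rw [hrowget, PySem.List.slice_from _ hc0, pvCountUntilDot_eq_index]
      rw [zero_add]
    · -- down
      rw [if_neg hdir, if_neg hdir]
      have hcw : ∀ row ∈ grid, c < (row.length : Int) := by
        intro row hrow
        rw [hrect row hrow]
        exact hdwn hdir
      rw [pvDownLoop_eq grid c hc0 hcw _ r 0 hr0 rfl]
      rw [PySem.List.slice_from _ hr0, pvCountUntilDot_eq_index]
      rw [zero_add]
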